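-- pv_equiv track=rewrite | github.com/marioahn/daily-solving-code | Mincoding/안희재/5.심화반1/38-2.py | art
-- ===== SOURCE A (Python) =====
-- def art(list):
--     Sum = 0
--     for i in range(len(list)-1):
--         if list[i] == list[i+1]:
--             Sum -= 50
--         if 0 < abs(ord(list[i]) - ord(list[i+1])) <= 5:
--             Sum += 3
--         if abs(ord(list[i]) - ord(list[i+1])) >= 20:
--             Sum += 10
--     return Sum
-- ===== SOURCE B (Python) =====
-- def _bucket_score(d):
--     # score of one distinct adjacent-difference bucket
--     if d == 0:
--         return -50
--     if d <= 5:
--         return 3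
--     if d >= 20:
--         return 10
--     return 0
--
--
-- def art(list):
--     # B: build a histogram of adjacent ordinal differences first, then score
--     # each distinct difference once, weighted by its frequency.
--     hist = {}
--     for a, b in zip(list, list[1:]):
--         d = abs(ord(a) - ord(b))
--         hist[d] = hist.get(d, 0) + 1
--     return sum(_bucket_score(d) * c for d, c in hist.items())
-- ===== Notes on version B (the rewrite author's own statement) =====
-- stated objective: alternative
-- what changed: B first builds a frequency histogram (dict) of the adjacent ordinal differences and then scores in a second pass over the histogram buckets, scoring each distinct difference once weighted by its count, instead of A's single index loop that scores every pair inline with three conditionals.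
import Mathlib
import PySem

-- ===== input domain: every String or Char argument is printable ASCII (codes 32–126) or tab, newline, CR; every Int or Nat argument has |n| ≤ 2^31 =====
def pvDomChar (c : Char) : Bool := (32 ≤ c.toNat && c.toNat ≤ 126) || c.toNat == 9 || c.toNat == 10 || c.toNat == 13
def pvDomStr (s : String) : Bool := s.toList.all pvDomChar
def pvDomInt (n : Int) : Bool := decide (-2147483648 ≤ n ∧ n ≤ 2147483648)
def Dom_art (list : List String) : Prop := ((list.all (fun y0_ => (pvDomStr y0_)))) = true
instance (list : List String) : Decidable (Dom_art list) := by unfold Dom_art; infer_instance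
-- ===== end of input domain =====

-- B builds a histogram (dict) of the adjacent ordinal differences first, then scores each distinct
-- difference once, weighted by its count, in a second pass over the buckets; same O(n) cost (alternative).


-- ===== PORT A =====
-- ord(s): exact for the length-1 strings Pre_art admits (Python raises TypeError otherwise)
def pyOrd (s : String) : Int :=
  match s.toList with
  | [c] => (c.toNat : Int)
  | _ => 0

def art (list : List String) : Int :=
  (PySem.List.pyRange 0 ((list.length : Int) - 1) 1).foldl
    (fun Sum i =>
      let a := PySem.List.pyGetD list i ""
      let b := PySem.List.pyGetD list (i + 1) ""
      let Sum := if a = b then Sum - 50 else Sum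
      let Sum := if 0 < |pyOrd a - pyOrd b| ∧ |pyOrd a - pyOrd b| ≤ 5 then Sum + 3 else Sum
      if 20 ≤ |pyOrd a - pyOrd b| then Sum + 10 else Sum) 0

-- ===== PORT B =====
def bucketScore (d : Int) : Int :=
  if d = 0 then -50
  else if d ≤ 5 then 3
  else if 20 ≤ d then 10
  else 0

def art_alt (list : List String) : Int :=
  let hist := (list.zip (PySem.List.slice list (some 1) none)).foldl
    (fun h p =>
      let d := |pyOrd p.1 - pyOrd p.2|
      h.insert d (h.getD d 0 + 1))
    (PySem.Dict.empty : PySem.Dict Int Int)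
  (hist.items.map (fun p => bucketScore p.1 * p.2)).sum

-- ===== PRECONDITION & SPEC =====
-- Pre_ excludes exactly the inputs where Python's ord raises TypeError: lists of length ≥ 2
-- containing a string whose length is not 1 (with length ≤ 1 the loop body never runs and A returns 0).
def Pre_art (list : List String) : Prop :=
  2 ≤ list.length → ∀ s ∈ list, PySem.Str.len s = 1
instance (list : List String) : Decidable (Pre_art list) := by unfold Pre_art; infer_instance
def pvWitness_art : List String := ["a", "c", "c", "z"]

def Spec_art (list : List String) (out : Int) : Prop := out = art_alt list
instance (list : List String) (out : Int) : Decidable (Spec_art list out) := by unfold Spec_art; infer_instance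

-- ===== CLAIM (what is proved, stated in full; the proofs are below) =====
def Claim_equal_art : Prop := ∀ (list : List String), Dom_art list → Pre_art list → Spec_art list (art list)

-- ===== LEMMAS AND PROOFS =====

-- the per-pair step of A's loop, named for the proofs
def stepA : Int → String × String → Int := fun Sum p =>
  let a := p.1
  let b := p.2
  let Sum := if a = b then Sum - 50 else Sum
  let Sum := if 0 < |pyOrd a - pyOrd b| ∧ |pyOrd a - pyOrd b| ≤ 5 then Sum + 3 else Sum
  if 20 ≤ |pyOrd a - pyOrd b| then Sum + 10 else Sum

-- the index loop reads exactly the adjacent pairs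
lemma pairs_eq (list : List String) :
    (PySem.List.pyRange 0 ((list.length : Int) - 1) 1).map
      (fun i => (PySem.List.pyGetD list i "", PySem.List.pyGetD list (i + 1) ""))
      = list.zip list.tail := by
  apply List.ext_getElem
  · simp only [List.length_map, PySem.List.length_pyRange_one, List.length_zip,
      List.length_tail]
    omega
  · intro k h1 h2
    simp only [List.getElem_map, PySem.List.getElem_pyRange_one, List.getElem_zip,
      Prod.mk.injEq]
    have hk : k < list.length - 1 := by
      simpa [PySem.List.length_pyRange_one] using h1
    have h01 : (0 : Int) + (k : Int) = ((k : Nat) : Int) := by omega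
    have h02 : (0 : Int) + (k : Int) + 1 = (((k + 1 : Nat)) : Int) := by omega
    constructor
    · rw [h01, PySem.List.pyGetD_natCast, List.getD_eq_getElem]
    · rw [h02, PySem.List.pyGetD_natCast, List.getD_eq_getElem]
      · simp [List.getElem_tail]
      · omega

lemma single_eq_iff (s t : String) (hs : s.toList.length = 1) (ht : t.toList.length = 1) :
    s = t ↔ |pyOrd s - pyOrd t| = 0 := by
  obtain ⟨c, hc⟩ : ∃ c, s.toList = [c] := by
    cases h : s.toList with
    | nil => simp [h] at hs
    | cons x xs => cases xs with
      | nil => exact ⟨x, rfl⟩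
      | cons y ys => simp [h] at hs
  obtain ⟨d, hd⟩ : ∃ d, t.toList = [d] := by
    cases h : t.toList with
    | nil => simp [h] at ht
    | cons x xs => cases xs with
      | nil => exact ⟨x, rfl⟩
      | cons y ys => simp [h] at ht
  constructor
  · intro h; simp [h]
  · intro h
    have hcd : (c.toNat : Int) = (d.toNat : Int) := by
      simp [pyOrd, hc, hd] at h; omega
    have hcd2 : c = d := by
      apply Char.ext
      exact UInt32.toNat_inj.mp (by exact_mod_cast hcd)
    exact String.toList_inj.mp (by rw [hc, hd, hcd2])

-- A's loop over pairs, accumulator generalised, is Sum plus the sum of bucketScore over the diffs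
lemma fold_pairs (P : List (String × String))
    (hP : ∀ p ∈ P, (p.1 = p.2 ↔ |pyOrd p.1 - pyOrd p.2| = 0)) (Sum : Int) :
    P.foldl stepA Sum
      = Sum + ((P.map (fun p => |pyOrd p.1 - pyOrd p.2|)).map bucketScore).sum := by
  induction P generalizing Sum with
  | nil => simp
  | cons p P' ih =>
    have hp := hP p List.mem_cons_self
    have hP' : ∀ q ∈ P', (q.1 = q.2 ↔ |pyOrd q.1 - pyOrd q.2| = 0) :=
      fun q hq => hP q (List.mem_cons_of_mem _ hq)
    simp only [List.foldl_cons, List.map_cons, List.sum_cons]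
    rw [ih hP']
    have hkey : stepA Sum p = Sum + bucketScore |pyOrd p.1 - pyOrd p.2| := by
      by_cases h0 : |pyOrd p.1 - pyOrd p.2| = 0
      · have hb : bucketScore |pyOrd p.1 - pyOrd p.2| = -50 := by
          rw [h0]; decide
        rw [hb]
        simp only [stepA, if_pos (hp.mpr h0),
          if_neg (by omega : ¬ (0 < |pyOrd p.1 - pyOrd p.2| ∧ |pyOrd p.1 - pyOrd p.2| ≤ 5)),
          if_neg (by omega : ¬ (20 ≤ |pyOrd p.1 - pyOrd p.2|))]
        ring
      · have hne : ¬ p.1 = p.2 := fun h => h0 (hp.mp h)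
        have hd0 : (0 : Int) ≤ |pyOrd p.1 - pyOrd p.2| := abs_nonneg _
        by_cases h5 : |pyOrd p.1 - pyOrd p.2| ≤ 5
        · have hb : bucketScore |pyOrd p.1 - pyOrd p.2| = 3 := by
            simp only [bucketScore, if_neg h0, if_pos h5]
          rw [hb]
          simp only [stepA, if_neg hne,
            if_neg (by omega : ¬ (20 ≤ |pyOrd p.1 - pyOrd p.2|))]
          rw [if_pos (And.intro (lt_of_le_of_ne hd0 (Ne.symm h0)) h5)]
        · by_cases h20 : 20 ≤ |pyOrd p.1 - pyOrd p.2|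
          · have hb : bucketScore |pyOrd p.1 - pyOrd p.2| = 10 := by
              simp only [bucketScore, if_neg h0, if_neg h5, if_pos h20]
            rw [hb]
            simp only [stepA, if_neg hne,
              if_neg (by omega : ¬ (0 < |pyOrd p.1 - pyOrd p.2| ∧ |pyOrd p.1 - pyOrd p.2| ≤ 5)),
              if_pos h20]
          · have hb : bucketScore |pyOrd p.1 - pyOrd p.2| = 0 := by
              simp only [bucketScore, if_neg h0, if_neg h5, if_neg h20]
            rw [hb]
            simp only [stepA, if_neg hne,
              if_neg (by omega : ¬ (0 < |pyOrd p.1 - pyOrd p.2| ∧ |pyOrd p.1 - pyOrd p.2| ≤ 5)),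
              if_neg h20]
            ring
    rw [hkey]
    ring

-- summing over a list partitions into the filter on a predicate and its complement
lemma sum_map_partition (L : List Int) (f : Int → Int) (p : Int → Bool) :
    (L.map f).sum = ((L.filter p).map f).sum + ((L.filter (fun x => !p x)).map f).sum := by
  induction L with
  | nil => simp
  | cons x L' ih =>
    by_cases h : p x = true <;> simp [h, ih] <;> ring

-- a nodup cover of L: summing f k * count k over the cover equals summing f over L
lemma sum_count (S : List Int) (hS : S.Nodup) (L : List Int) (hL : ∀ x ∈ L, x ∈ S)
    (f : Int → Int) :
    (S.map (fun k => f k * (L.count k : Int))).sum = (L.map f).sum := by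
  induction S generalizing L with
  | nil =>
    have : L = [] := by
      cases L with
      | nil => rfl
      | cons x t => exact absurd (hL x List.mem_cons_self) (by simp)
    simp [this]
  | cons k S' ih =>
    have hk : k ∉ S' := (List.nodup_cons.mp hS).1
    have hS' : S'.Nodup := (List.nodup_cons.mp hS).2
    have hcount : ∀ j ∈ S',
        (L.count j : Int) = ((L.filter (fun x => !(x == k))).count j : Int) := by
      intro j hj
      have hjk : j ≠ k := fun h => hk (h ▸ hj)
      simp [List.count_filter, hjk]
    have hLcov : ∀ x ∈ L.filter (fun x => !(x == k)), x ∈ S' := by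
      intro x hx
      have hxL := List.mem_of_mem_filter hx
      have hxne : x ≠ k := by
        have := List.of_mem_filter hx
        simpa using this
      cases List.mem_cons.mp (hL x hxL) with
      | inl h => exact absurd h hxne
      | inr h => exact h
    have hmapS' : (S'.map (fun j => f j * (L.count j : Int))).sum
        = (S'.map (fun j => f j * ((L.filter (fun x => !(x == k))).count j : Int))).sum := by
      exact congrArg List.sum (List.map_congr_left fun j hj => by rw [hcount j hj])
    have hsplit := sum_map_partition L f (fun x => x == k)
    have hrep : ((L.filter (fun x => x == k)).map f).sum = f k * (L.count k : Int) := by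
      rw [show L.filter (fun x => x == k) = List.replicate (L.count k) k from by
        simpa using List.filter_beq (l := L) (a := k)]
      simp [List.map_replicate, List.sum_replicate, mul_comm]
    simp only [List.map_cons, List.sum_cons]
    rw [hmapS', ih hS' _ hLcov, hsplit, hrep]

-- ===== VERDICT (by name: the statement is the Claim_ definition above) =====
theorem art_spec : Claim_equal_art := by
  intro list _hdom hpre
  unfold Spec_art art art_alt
  simp only [PySem.List.slice_from_one]
  have hgood : ∀ p ∈ list.zip list.tail, (p.1 = p.2 ↔ |pyOrd p.1 - pyOrd p.2| = 0) := by
    intro p hp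
    have h2 : 2 ≤ list.length := by
      match list, hp with
      | [], hp => simp at hp
      | [x], hp => simp at hp
      | x :: y :: t, hp => simp
    have hmem := List.of_mem_zip hp
    have h1 : PySem.Str.len p.1 = 1 := hpre h2 p.1 hmem.1
    have h2' : PySem.Str.len p.2 = 1 := hpre h2 p.2 (List.mem_of_mem_tail hmem.2)
    rw [PySem.Str.len_eq] at h1 h2'
    exact single_eq_iff p.1 p.2 (by exact_mod_cast h1) (by exact_mod_cast h2')
  -- A side: index loop = fold over the pair list = sum of bucketScore over the diffs
  have hA : (PySem.List.pyRange 0 ((list.length : Int) - 1) 1).foldl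
      (fun Sum i =>
        let a := PySem.List.pyGetD list i ""
        let b := PySem.List.pyGetD list (i + 1) ""
        let Sum := if a = b then Sum - 50 else Sum
        let Sum := if 0 < |pyOrd a - pyOrd b| ∧ |pyOrd a - pyOrd b| ≤ 5 then Sum + 3 else Sum
        if 20 ≤ |pyOrd a - pyOrd b| then Sum + 10 else Sum) 0
      = (list.zip list.tail).foldl stepA 0 := by
    rw [← pairs_eq list, List.foldl_map]
    rfl
  rw [hA, fold_pairs (list.zip list.tail) hgood 0]
  -- B side: the histogram fold is the counter of the diff list; its items sum back to the diffs
  set diffs := (list.zip list.tail).map (fun p => |pyOrd p.1 - pyOrd p.2|) with hdiffs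
  have hB : ((list.zip list.tail).foldl
      (fun h p =>
        let d := |pyOrd p.1 - pyOrd p.2|
        h.insert d (h.getD d 0 + 1))
      (PySem.Dict.empty : PySem.Dict Int Int))
      = PySem.Dict.counter diffs := by
    rw [hdiffs, ← PySem.Dict.foldl_insert_getD_add_one_eq_counter, List.foldl_map]
  rw [hB, PySem.Dict.items_counter]
  have hR : List.map (fun p : Int × Int => bucketScore p.1 * p.2)
      (List.map (fun k => (k, (diffs.count k : Int))) (PySem.Set.ofList diffs))
      = (PySem.Set.ofList diffs).map (fun k => bucketScore k * (diffs.count k : Int)) := by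
    rw [List.map_map]; rfl
  rw [hR, sum_count (PySem.Set.ofList diffs) (PySem.Set.nodup_ofList diffs) diffs
    (fun x hx => (PySem.Set.mem_ofList diffs x).mpr hx) bucketScore]
  ring
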